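-- pv_equiv track=rewrite | github.com/NeuronalDynamics/AI-for-Mathematics | 6_20_2024_SYT/SYT.py | reshape_perm
-- ===== SOURCE A (Python) =====
-- def reshape_perm(perm, shape):
--   """
--   Reshapes a permutation into a tableau based on the given shape.
--
--   Parameters:
--   - perm (Tuple[int]): The permutation to be reshaped.
--   - shape (Tuple[int]): The shape of the resulting tableau as a weakly decreasing tuple of integers.
--
--   Returns:
--   - Tuple[Tuple[int]]: A tuple of tuples representing the reshaped permutation as a tableau.
--
--   Example:
--   >>> reshape_perm((1, 2, 3, 4, 5, 6), (3, 2, 1))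
--   ((1, 2, 3), (4, 5), (6,))
--   """
--   tableau = []
--   index = 0
--   for row_length in shape:
--       row = tuple(perm[index:index + row_length])
--       tableau.append(row)
--       index += row_length
--   return tuple(tableau)
-- ===== SOURCE B (Python) =====
-- def reshape_perm(perm, shape):
--   shape = list(shape)
--
--   def go(lo, hi, start):
--     # rows for shape[lo:hi], whose first row begins at absolute index `start`
--     if hi - lo == 0:
--       return []
--     if hi - lo == 1:
--       r = shape[lo]
--       return [tuple(perm[start:start + r])]
--     mid = (lo + hi) // 2
--     return go(lo, mid, start) + go(mid, hi, start + sum(shape[lo:mid]))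
--
--   return tuple(go(0, len(shape), 0))
-- ===== Notes on version B (the rewrite author's own statement) =====
-- stated objective: alternative
-- what changed: Replaces A's sequential loop with a mutable running index by a divide-and-conquer recursion on the shape: the shape interval is split in half, each half is reshaped recursively, and the right half's starting offset is the sum of the left half's row lengths.
import Mathlib
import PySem

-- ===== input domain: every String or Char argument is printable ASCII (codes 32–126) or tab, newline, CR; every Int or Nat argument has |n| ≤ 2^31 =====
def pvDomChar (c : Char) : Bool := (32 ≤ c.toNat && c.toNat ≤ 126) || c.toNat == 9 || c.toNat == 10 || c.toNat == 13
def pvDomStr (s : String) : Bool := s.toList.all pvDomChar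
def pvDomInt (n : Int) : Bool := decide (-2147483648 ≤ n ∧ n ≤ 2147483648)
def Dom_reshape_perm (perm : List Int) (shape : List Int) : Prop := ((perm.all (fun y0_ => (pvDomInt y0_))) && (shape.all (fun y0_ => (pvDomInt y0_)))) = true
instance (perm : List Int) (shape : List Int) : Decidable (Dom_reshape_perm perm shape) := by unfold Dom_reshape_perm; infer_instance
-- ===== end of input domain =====

-- B replaces A's sequential running-index loop by a divide-and-conquer recursion on the
-- shape interval (alternative decomposition, same return value on every input).

-- ===== PORT A =====
-- for row_length in shape: row = perm[index:index+row_length]; tableau.append(row); index += row_length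
def reshape_perm (perm : List Int) (shape : List Int) : List (List Int) :=
  (shape.foldl
    (fun (st : List (List Int) × Int) row_length =>
      (st.1 ++ [PySem.List.slice perm (some st.2) (some (st.2 + row_length))],
       st.2 + row_length))
    ([], 0)).1

-- ===== PORT B =====
-- go(lo, hi, start): rows for shape[lo:hi] whose first row starts at absolute index `start`;
-- split the interval at mid=(lo+hi)//2, offset the right half by sum(shape[lo:mid]).
-- (shape[lo] is ported as shape.getD lo 0: every call has lo < shape.length, so Python never raises.)
def pvGoB (perm shape : List Int) (lo hi : Nat) (start : Int) : List (List Int) :=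
  if _hlt : lo < hi then
    if hi = lo + 1 then
      [PySem.List.slice perm (some start) (some (start + shape.getD lo 0))]
    else
      pvGoB perm shape lo ((lo + hi) / 2) start ++
      pvGoB perm shape ((lo + hi) / 2) hi
        (start + (PySem.List.slice shape (some (lo : Int)) (some (((lo + hi) / 2 : Nat) : Int))).sum)
  else []
termination_by hi - lo
decreasing_by all_goals omega

def reshape_perm_alt (perm : List Int) (shape : List Int) : List (List Int) :=
  pvGoB perm shape 0 shape.length 0

-- ===== PRECONDITION & SPEC =====
def Spec_reshape_perm (perm : List Int) (shape : List Int) (out : List (List Int)) : Prop := out = reshape_perm_alt perm shape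
instance (perm : List Int) (shape : List Int) (out : List (List Int)) : Decidable (Spec_reshape_perm perm shape out) := by unfold Spec_reshape_perm; infer_instance

-- ===== CLAIM (what is proved, stated in full; the proofs are below) =====
def Claim_equal_reshape_perm : Prop := ∀ (perm : List Int) (shape : List Int), Dom_reshape_perm perm shape → Spec_reshape_perm perm shape (reshape_perm perm shape)

-- ===== LEMMAS AND PROOFS =====

-- reference row list: the slices at successive boundaries starting from index i
def pvRows (perm : List Int) (i : Int) : List Int → List (List Int)
  | [] => []
  | r :: rs => PySem.List.slice perm (some i) (some (i + r)) :: pvRows perm (i + r) rs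

theorem pvFoldA (perm : List Int) (shape : List Int) :
    ∀ (acc : List (List Int)) (i : Int),
      (shape.foldl
        (fun (st : List (List Int) × Int) r =>
          (st.1 ++ [PySem.List.slice perm (some st.2) (some (st.2 + r))], st.2 + r))
        (acc, i)).1 = acc ++ pvRows perm i shape := by
  induction shape with
  | nil => intro acc i; simp [pvRows]
  | cons r rs ih =>
      intro acc i
      simp only [List.foldl_cons, pvRows]
      rw [ih]
      simp

theorem pvRows_append (perm : List Int) (xs ys : List Int) :
    ∀ (i : Int), pvRows perm i (xs ++ ys) = pvRows perm i xs ++ pvRows perm (i + xs.sum) ys := by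
  induction xs with
  | nil => intro i; simp [pvRows]
  | cons r rs ih =>
      intro i
      simp only [List.cons_append, pvRows, ih, List.sum_cons]
      rw [add_assoc]

theorem pvTakeSplit (shape : List Int) (a m b : Nat) (h1 : a ≤ m) (h2 : m ≤ b) :
    (shape.drop a).take (b - a) = (shape.drop a).take (m - a) ++ (shape.drop m).take (b - m) := by
  rw [← List.take_append_drop (m - a) ((shape.drop a).take (b - a))]
  congr 1
  · have hmin : min (m - a) (b - a) = m - a := by omega
    rw [List.take_take, hmin]
  · rw [List.drop_take, List.drop_drop]
    have e1 : b - a - (m - a) = b - m := by omega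
    have e2 : a + (m - a) = m := by omega
    rw [e1, e2]

theorem pvGoB_rows (perm shape : List Int) :
    ∀ (n lo hi : Nat) (start : Int), hi - lo ≤ n → lo ≤ hi → hi ≤ shape.length →
      pvGoB perm shape lo hi start = pvRows perm start ((shape.drop lo).take (hi - lo)) := by
  intro n
  induction n with
  | zero =>
      intro lo hi start h1 _ _
      have : hi = lo ∨ hi - lo = 0 := Or.inr (Nat.le_zero.mp h1)
      rw [pvGoB]
      simp [Nat.le_zero.mp h1, show ¬ lo < hi by omega, pvRows]
  | succ n ih =>
      intro lo hi start h1 h2 h3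
      rw [pvGoB]
      by_cases hlt : lo < hi
      · simp only [hlt, dif_pos]
        by_cases hone : hi = lo + 1
        · subst hone
          have hlo : lo < shape.length := by omega
          have : (shape.drop lo).take (lo + 1 - lo) = [shape.getD lo 0] := by
            rw [List.getD_eq_getElem _ _ hlo]
            rw [show lo + 1 - lo = 1 from by omega]
            rw [List.take_one, List.head?_drop]
            simp [List.getElem?_eq_getElem hlo]
          rw [this]
          simp [pvRows]
        · simp only [if_neg hone]
          have hmid1 : lo < (lo + hi) / 2 := by omega
          have hmid2 : (lo + hi) / 2 < hi := by omega
          rw [ih lo ((lo + hi) / 2) start (by omega) (by omega) (by omega),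
              ih ((lo + hi) / 2) hi _ (by omega) (by omega) h3]
          have hslice : PySem.List.slice shape (some (lo : Int)) (some (((lo + hi) / 2 : Nat) : Int))
              = (shape.drop lo).take ((lo + hi) / 2 - lo) := by
            rw [PySem.List.slice_toNat shape (by positivity) (by positivity)]
            simp only [Int.toNat_natCast]
          rw [hslice, pvTakeSplit shape lo ((lo + hi) / 2) hi (by omega) (by omega),
              pvRows_append]
      · simp [hlt, show hi - lo = 0 by omega, pvRows]

-- ===== VERDICT (by name: the statement is the Claim_ definition above) =====
theorem reshape_perm_spec : Claim_equal_reshape_perm := by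
  intro perm shape _
  unfold Spec_reshape_perm reshape_perm reshape_perm_alt
  rw [pvFoldA perm shape [] 0,
      pvGoB_rows perm shape shape.length 0 shape.length 0 (by omega) (by omega) (by omega)]
  simp
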